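-- pv_equiv track=rewrite | github.com/cseas002/wep-cracking | wep_crack_c_test/fms_attack2.py | organize_ivs_by_a
-- ===== SOURCE A (Python) =====
-- def organize_ivs_by_a(ivs, ciphertexts):
--     organized_ivs = {}
--
--     for iv, ciphertext in zip(ivs, ciphertexts):
--         a = iv[0]  # a is the first element of the IV
--         if a == 2 or a > 7:
--             continue
--         if a not in organized_ivs:
--             organized_ivs[a] = {'ivs': [], 'ciphertexts': []}
--
--         organized_ivs[a]['ivs'].append(iv)
--         organized_ivs[a]['ciphertexts'].append(ciphertext)
--
--     return organized_ivs
-- ===== SOURCE B (Python) =====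
-- def organize_ivs_by_a(ivs, ciphertexts):
--     pairs = [(iv, ct) for iv, ct in zip(ivs, ciphertexts) if iv[0] != 2 and iv[0] <= 7]
--     keys = list(dict.fromkeys(iv[0] for iv, _ in pairs))
--     return {a: {'ivs': [iv for iv, ct in pairs if iv[0] == a],
--                 'ciphertexts': [ct for iv, ct in pairs if iv[0] == a]}
--             for a in keys}
-- ===== Notes on version B (the rewrite author's own statement) =====
-- stated objective: alternative
-- what changed: Replaces the element-by-element scan that dispatches into a mutable dict-of-dicts with a filter-once / dedup-keys / per-key-comprehension pipeline that builds each group's entry in one go (keys kept in first-occurrence order).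
import Mathlib
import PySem

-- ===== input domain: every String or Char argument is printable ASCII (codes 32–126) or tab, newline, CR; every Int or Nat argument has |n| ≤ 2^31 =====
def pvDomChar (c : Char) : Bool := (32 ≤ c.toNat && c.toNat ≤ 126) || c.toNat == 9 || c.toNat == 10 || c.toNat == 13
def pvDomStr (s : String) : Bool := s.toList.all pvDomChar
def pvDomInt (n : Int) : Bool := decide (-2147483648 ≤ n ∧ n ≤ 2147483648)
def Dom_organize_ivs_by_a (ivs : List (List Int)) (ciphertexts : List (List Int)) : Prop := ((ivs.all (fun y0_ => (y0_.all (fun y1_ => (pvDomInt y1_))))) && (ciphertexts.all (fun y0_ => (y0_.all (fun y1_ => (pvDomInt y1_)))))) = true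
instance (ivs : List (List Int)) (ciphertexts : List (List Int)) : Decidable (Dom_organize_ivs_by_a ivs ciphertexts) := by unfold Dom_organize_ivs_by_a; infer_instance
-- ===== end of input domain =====

-- B replaces A's scan-and-dispatch into a mutable dict-of-dicts by a filter-once / dedup-keys /
-- per-key-comprehension pipeline (same values, keys in first-occurrence order); alternative decomposition, not faster.


-- ===== PORT A =====
-- organized_ivs[a] = {'ivs': [], 'ciphertexts': []}
def pvInitA : PySem.Dict String (List (List Int)) :=
  (PySem.Dict.empty.insert "ivs" []).insert "ciphertexts" []

-- one iteration of A's for-loop (iv[0] ported as pyGetD, total under Pre_)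
def pvStepA (d : PySem.Dict Int (PySem.Dict String (List (List Int)))) (p : List Int × List Int) :
    PySem.Dict Int (PySem.Dict String (List (List Int))) :=
  let a := PySem.List.pyGetD p.1 0 0
  if a = 2 ∨ 7 < a then d
  else
    let d1 := if d.contains a then d else d.insert a pvInitA
    let d2 := d1.modify a PySem.Dict.empty (fun inner => inner.modify "ivs" [] (fun l => l ++ [p.1]))
    d2.modify a PySem.Dict.empty (fun inner => inner.modify "ciphertexts" [] (fun l => l ++ [p.2]))

def organize_ivs_by_a (ivs : List (List Int)) (ciphertexts : List (List Int)) :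
    List (Int × List (String × List (List Int))) :=
  (((ivs.zip ciphertexts).foldl pvStepA PySem.Dict.empty).items).map (fun q => (q.1, q.2.items))

-- ===== PORT B =====
def pvKeyB (p : List Int × List Int) : Int := PySem.List.pyGetD p.1 0 0

def pvKeepB (p : List Int × List Int) : Bool := !(pvKeyB p == 2) && decide (pvKeyB p ≤ 7)

-- {'ivs': [iv for iv, ct in pairs if iv[0] == a], 'ciphertexts': [ct for iv, ct in pairs if iv[0] == a]}
def pvEntryB (pairs : List (List Int × List Int)) (a : Int) : List (String × List (List Int)) :=
  [("ivs", (pairs.filter (fun p => pvKeyB p == a)).map (fun p => p.1)),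
   ("ciphertexts", (pairs.filter (fun p => pvKeyB p == a)).map (fun p => p.2))]

def organize_ivs_by_a_alt (ivs : List (List Int)) (ciphertexts : List (List Int)) :
    List (Int × List (String × List (List Int))) :=
  let pairs := (ivs.zip ciphertexts).filter pvKeepB
  let keys := PySem.List.dedup (pairs.map pvKeyB)
  keys.map (fun a => (a, pvEntryB pairs a))

-- ===== PRECONDITION & SPEC =====
-- A raises IndexError (iv[0]) when a paired-off iv is empty; Pre_ excludes exactly those inputs.
def Pre_organize_ivs_by_a (ivs : List (List Int)) (ciphertexts : List (List Int)) : Prop :=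
  ∀ p ∈ ivs.zip ciphertexts, p.1 ≠ []
instance (ivs : List (List Int)) (ciphertexts : List (List Int)) : Decidable (Pre_organize_ivs_by_a ivs ciphertexts) := by unfold Pre_organize_ivs_by_a; infer_instance
def pvWitness_organize_ivs_by_a : List (List Int) × List (List Int) :=
  ([[0], [3], [0], [2], [8], [-1]], [[1], [2], [3], [4], [5], [6]])

def Spec_organize_ivs_by_a (ivs : List (List Int)) (ciphertexts : List (List Int)) (out : List (Int × List (String × List (List Int)))) : Prop := out = organize_ivs_by_a_alt ivs ciphertexts
instance (ivs : List (List Int)) (ciphertexts : List (List Int)) (out : List (Int × List (String × List (List Int)))) : Decidable (Spec_organize_ivs_by_a ivs ciphertexts out) := by unfold Spec_organize_ivs_by_a; infer_instance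

-- ===== CLAIM (what is proved, stated in full; the proofs are below) =====
def Claim_equal_organize_ivs_by_a : Prop := ∀ (ivs : List (List Int)) (ciphertexts : List (List Int)), Dom_organize_ivs_by_a ivs ciphertexts → Pre_organize_ivs_by_a ivs ciphertexts → Spec_organize_ivs_by_a ivs ciphertexts (organize_ivs_by_a ivs ciphertexts)

-- ===== LEMMAS AND PROOFS =====

-- the two appends A performs on one group's inner dict, as one function
def pvApply (p : List Int × List Int) (inner : PySem.Dict String (List (List Int))) :
    PySem.Dict String (List (List Int)) :=
  (inner.modify "ivs" [] (fun l => l ++ [p.1])).modify "ciphertexts" [] (fun l => l ++ [p.2])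

lemma pvApply_mk (p : List Int × List Int) (u v : List (List Int)) :
    pvApply p (PySem.Dict.mk [("ivs", u), ("ciphertexts", v)])
      = PySem.Dict.mk [("ivs", u ++ [p.1]), ("ciphertexts", v ++ [p.2])] := by
  simp [pvApply, PySem.Dict.modify, PySem.Dict.insert, PySem.Dict.getD, PySem.Dict.get?,
        PySem.Dict.contains]

lemma pvApply_empty (p : List Int × List Int) :
    pvApply p PySem.Dict.empty = PySem.Dict.mk [("ivs", [p.1]), ("ciphertexts", [p.2])] := by
  simp [pvApply, PySem.Dict.modify, PySem.Dict.insert, PySem.Dict.getD, PySem.Dict.get?,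
        PySem.Dict.contains, PySem.Dict.empty]

lemma pvApply_init (p : List Int × List Int) :
    pvApply p pvInitA = PySem.Dict.mk [("ivs", [p.1]), ("ciphertexts", [p.2])] := by
  have h : pvInitA = PySem.Dict.mk [("ivs", []), ("ciphertexts", [])] := by decide
  rw [h, pvApply_mk]; simp

lemma pvFoldl_apply (ps : List (List Int × List Int)) :
    ∀ u v, ps.foldl (fun inn p => pvApply p inn) (PySem.Dict.mk [("ivs", u), ("ciphertexts", v)])
      = PySem.Dict.mk [("ivs", u ++ ps.map (fun p => p.1)), ("ciphertexts", v ++ ps.map (fun p => p.2))] := by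
  induction ps with
  | nil => intro u v; simp
  | cons q t ih =>
      intro u v
      simp only [List.foldl_cons, pvApply_mk, ih, List.map_cons]
      simp

lemma pvStepA_getD (d : PySem.Dict Int (PySem.Dict String (List (List Int))))
    (p : List Int × List Int) (k : Int) :
    (pvStepA d p).getD k PySem.Dict.empty
      = if pvKeepB p && (pvKeyB p == k) then pvApply p (d.getD k PySem.Dict.empty)
        else d.getD k PySem.Dict.empty := by
  unfold pvStepA
  by_cases hskip : PySem.List.pyGetD p.1 0 0 = 2 ∨ 7 < PySem.List.pyGetD p.1 0 0
  · have hkeep : pvKeepB p = false := by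
      simp only [pvKeepB, pvKeyB, Bool.and_eq_false_iff, Bool.not_eq_false', beq_iff_eq,
        decide_eq_false_iff_not]
      omega
    simp [hskip, hkeep]
  · have hkeep : pvKeepB p = true := by
      simp only [pvKeepB, pvKeyB, Bool.and_eq_true, Bool.not_eq_true', beq_eq_false_iff_ne,
        ne_eq, decide_eq_true_eq]
      omega
    simp only [hskip, if_false, hkeep, Bool.true_and]
    simp only [PySem.Dict.getD_modify]
    rcases eq_or_ne k (PySem.List.pyGetD p.1 0 0) with hk | hk
    · have hb : (pvKeyB p == k) = true := by simp [pvKeyB, hk]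
      simp only [hb, if_pos hk, if_true]
      by_cases hc : d.contains (PySem.List.pyGetD p.1 0 0) = true
      · simp only [if_pos hc, hk]
        rfl
      · simp only [if_neg hc, PySem.Dict.getD_insert_self, hk,
          PySem.Dict.getD_of_not_contains d PySem.Dict.empty (by simpa using hc)]
        exact (pvApply_init p).trans (pvApply_empty p).symm
    · have hb : (pvKeyB p == k) = false := by
        simp only [pvKeyB, beq_eq_false_iff_ne, ne_eq]
        exact fun h => hk h.symm
      simp only [hb, Bool.false_eq_true, if_false, if_neg hk]
      by_cases hc : d.contains (PySem.List.pyGetD p.1 0 0) = true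
      · simp only [if_pos hc]
      · simp only [if_neg hc, PySem.Dict.getD_insert, if_neg hk]

lemma pvFoldl_getD (l : List (List Int × List Int)) :
    ∀ d k, ((l.foldl pvStepA d).getD k PySem.Dict.empty)
      = (l.filter (fun p => pvKeepB p && (pvKeyB p == k))).foldl (fun inn p => pvApply p inn)
          (d.getD k PySem.Dict.empty) := by
  induction l with
  | nil => intro d k; rfl
  | cons x t ih =>
      intro d k
      simp only [List.foldl_cons, ih, List.filter_cons]
      by_cases h : (pvKeepB x && (pvKeyB x == k)) = true
      · simp [h, pvStepA_getD, List.foldl_cons]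
      · simp [h, pvStepA_getD]

lemma pvStepA_keys (d : PySem.Dict Int (PySem.Dict String (List (List Int))))
    (p : List Int × List Int) :
    (pvStepA d p).keys = if pvKeepB p then PySem.Set.add d.keys (pvKeyB p) else d.keys := by
  unfold pvStepA
  by_cases hskip : PySem.List.pyGetD p.1 0 0 = 2 ∨ 7 < PySem.List.pyGetD p.1 0 0
  · have hkeep : pvKeepB p = false := by
      simp only [pvKeepB, pvKeyB, Bool.and_eq_false_iff, Bool.not_eq_false', beq_iff_eq,
        decide_eq_false_iff_not]
      omega
    simp [hskip, hkeep]
  · have hkeep : pvKeepB p = true := by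
      simp only [pvKeepB, pvKeyB, Bool.and_eq_true, Bool.not_eq_true', beq_eq_false_iff_ne,
        ne_eq, decide_eq_true_eq]
      omega
    simp only [hskip, if_false, hkeep, if_true]
    by_cases hc : d.contains (PySem.List.pyGetD p.1 0 0) = true
    · have hmem : PySem.List.pyGetD p.1 0 0 ∈ d.keys := (PySem.Dict.contains_iff_mem_keys d _).mp hc
      rw [if_pos hc]
      have hc2 : (d.modify (PySem.List.pyGetD p.1 0 0) PySem.Dict.empty
          (fun inner => inner.modify "ivs" [] (fun l => l ++ [p.1]))).contains
            (PySem.List.pyGetD p.1 0 0) = true := by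
        simp [PySem.Dict.contains_modify]
      rw [PySem.Dict.keys_modify, PySem.Dict.keys_insert_of_contains _ _ hc2,
          PySem.Dict.keys_modify, PySem.Dict.keys_insert_of_contains _ _ hc]
      simp [PySem.Set.add, hmem, pvKeyB]
    · have hmem : PySem.List.pyGetD p.1 0 0 ∉ d.keys := fun h =>
        hc ((PySem.Dict.contains_iff_mem_keys d _).mpr h)
      rw [if_neg hc]
      have hc1 : (d.insert (PySem.List.pyGetD p.1 0 0) pvInitA).contains
          (PySem.List.pyGetD p.1 0 0) = true := PySem.Dict.contains_insert_self d _ pvInitA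
      have hc2 : ((d.insert (PySem.List.pyGetD p.1 0 0) pvInitA).modify
          (PySem.List.pyGetD p.1 0 0) PySem.Dict.empty
          (fun inner => inner.modify "ivs" [] (fun l => l ++ [p.1]))).contains
            (PySem.List.pyGetD p.1 0 0) = true := by
        simp [PySem.Dict.contains_modify]
      rw [PySem.Dict.keys_modify, PySem.Dict.keys_insert_of_contains _ _ hc2,
          PySem.Dict.keys_modify, PySem.Dict.keys_insert_of_contains _ _ hc1,
          PySem.Dict.keys_insert_of_not_contains d _ (by simpa using hc)]
      simp [PySem.Set.add, hmem, pvKeyB]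

lemma pvFoldl_keys (l : List (List Int × List Int)) :
    ∀ d, (l.foldl pvStepA d).keys = ((l.filter pvKeepB).map pvKeyB).foldl PySem.Set.add d.keys := by
  induction l with
  | nil => intro d; rfl
  | cons x t ih =>
      intro d
      simp only [List.foldl_cons, ih, List.filter_cons]
      by_cases h : pvKeepB x = true
      · simp [h, pvStepA_keys]
      · simp [h, pvStepA_keys]

lemma pvNodup_foldl_add (xs : List Int) :
    ∀ acc : List Int, acc.Nodup → (xs.foldl PySem.Set.add acc).Nodup := by
  induction xs with
  | nil => intro acc h; exact h
  | cons x t ih =>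
      intro acc h
      refine ih _ ?_
      by_cases hx : x ∈ acc
      · simpa [PySem.Set.add, hx] using h
      · have hadd : (acc ++ [x]).Nodup := by
          rw [List.nodup_append]
          refine ⟨h, List.nodup_singleton x, ?_⟩
          intro a ha b hb
          have hbx : b = x := by simpa using hb
          subst hbx
          exact fun hab => hx (hab ▸ ha)
        simpa [PySem.Set.add, hx] using hadd

lemma pvDedup_eq_foldl (xs : List Int) :
    PySem.List.dedup xs = xs.foldl PySem.Set.add [] := rfl

-- ===== VERDICT (by name: the statement is the Claim_ definition above) =====
theorem organize_ivs_by_a_spec : Claim_equal_organize_ivs_by_a := by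
  intro ivs cts _dom _pre
  unfold Spec_organize_ivs_by_a organize_ivs_by_a organize_ivs_by_a_alt
  set l := ivs.zip cts with hl
  set F := l.foldl pvStepA PySem.Dict.empty with hF
  have hkeys : F.keys = ((l.filter pvKeepB).map pvKeyB).foldl PySem.Set.add [] := by
    simpa [PySem.Dict.keys, PySem.Dict.empty] using pvFoldl_keys l PySem.Dict.empty
  have hnd : F.keys.Nodup := by rw [hkeys]; exact pvNodup_foldl_add _ _ List.nodup_nil
  rw [PySem.Dict.items_eq_map_keys F hnd PySem.Dict.empty]
  rw [List.map_map]
  rw [hkeys, ← pvDedup_eq_foldl]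
  apply List.map_congr_left
  intro k hk
  simp only [Function.comp]
  congr 1
  -- (F.getD k ∅).items = pvEntryB (l.filter pvKeepB) k
  have hg : F.getD k PySem.Dict.empty
      = (l.filter (fun p => pvKeepB p && (pvKeyB p == k))).foldl (fun inn p => pvApply p inn)
          PySem.Dict.empty := by
    simpa [PySem.Dict.getD, PySem.Dict.get?, PySem.Dict.empty] using
      pvFoldl_getD l PySem.Dict.empty k
  have hff : (l.filter pvKeepB).filter (fun p => pvKeyB p == k)
      = l.filter (fun p => pvKeepB p && (pvKeyB p == k)) := by
    rw [List.filter_filter]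
    exact List.filter_congr (fun a _ => Bool.and_comm _ _)
  have hne : (l.filter pvKeepB).filter (fun p => pvKeyB p == k) ≠ [] := by
    have hk' : k ∈ (l.filter pvKeepB).map pvKeyB := by
      have := hk; rwa [PySem.List.dedup_eq_ofList, PySem.Set.mem_ofList] at this
    obtain ⟨p, hp, hpk⟩ := List.mem_map.mp hk'
    intro hnil
    have : p ∈ (l.filter pvKeepB).filter (fun p => pvKeyB p == k) :=
      List.mem_filter.mpr ⟨hp, by simp [hpk]⟩
    simp [hnil] at this
  rw [hg, ← hff]
  cases hps : (l.filter pvKeepB).filter (fun p => pvKeyB p == k) with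
  | nil => exact absurd hps hne
  | cons q t =>
      simp only [List.foldl_cons, pvApply_empty, pvFoldl_apply, pvEntryB, hps]
      simp
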